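-- pv_equiv track=rewrite | github.com/Annshix/Anomaly-Detection | data_pre.py | name_to_index
-- ===== SOURCE A (Python) =====
-- def name_to_index(obj):
--     prev = -1
--     index = 0
--     map_set = dict()
--     for item in obj:
--         if prev != item:
--             index += 1
--         map_set[item] = index
--         prev = item
--     return map_set
-- ===== SOURCE B (Python) =====
-- def name_to_index(obj):
--     # stage 1: a 1/0 change indicator for each position (prev of position 0 is the -1 sentinel)
--     changes = [int(x != p) for p, x in zip([-1] + obj, obj)]
--     # stage 2: prefix-sum the indicators -> the run index of every position
--     run = []
--     total = 0
--     for c in changes: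
--         total += c
--         run.append(total)
--     # stage 3: pair each item with its run index; duplicate keys keep first position, last value
--     return dict(zip(obj, run))
-- ===== Notes on version B (the rewrite author's own statement) =====
-- stated objective: alternative
-- what changed: B replaces A's single stateful loop (prev/index carried while writing the dict) by three staged passes: a zip-with-shifted-list pass producing 0/1 change indicators, a prefix-sum pass turning them into per-position run indices, and dict(zip(obj, run)) to build the mapping.
import Mathlib
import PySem

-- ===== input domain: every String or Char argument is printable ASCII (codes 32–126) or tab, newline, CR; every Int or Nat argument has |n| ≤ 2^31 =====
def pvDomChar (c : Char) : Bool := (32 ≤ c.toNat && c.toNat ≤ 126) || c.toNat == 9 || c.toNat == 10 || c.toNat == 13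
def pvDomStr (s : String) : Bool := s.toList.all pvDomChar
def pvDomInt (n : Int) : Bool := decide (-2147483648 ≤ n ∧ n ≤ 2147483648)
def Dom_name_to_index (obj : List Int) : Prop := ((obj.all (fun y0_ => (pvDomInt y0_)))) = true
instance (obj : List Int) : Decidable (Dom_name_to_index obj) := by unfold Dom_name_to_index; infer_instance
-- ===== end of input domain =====

-- B replaces A's single stateful loop by three staged passes (change indicators, prefix sums, dict(zip)); alternative decomposition, same cost.


-- ===== PORT A =====
-- loop body of A: state is (prev, index, map_set); one step per element
def ntiStepA (s : Int × Int × PySem.Dict Int Int) (item : Int) : Int × Int × PySem.Dict Int Int :=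
  let index := if s.1 ≠ item then s.2.1 + 1 else s.2.1
  (item, index, s.2.2.insert item index)

def name_to_index (obj : List Int) : List (Int × Int) :=
  (obj.foldl ntiStepA (-1, 0, PySem.Dict.empty)).2.2.items

-- ===== PORT B =====
-- stage 1: change indicators, zip([-1]+obj, obj) then 1/0 per pair
def ntiChanges (obj : List Int) : List Int :=
  (((-1 : Int) :: obj).zip obj).map fun p => if p.2 ≠ p.1 then (1 : Int) else 0

-- stage 2: the prefix-sum loop (run list + running total), as in Source B
def ntiPrefix (xs : List Int) : List Int :=
  (xs.foldl (fun (s : List Int × Int) c => (s.1 ++ [s.2 + c], s.2 + c)) ([], 0)).1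

-- stage 3: dict(zip(obj, run)) = insert the pairs in order into an empty dict
def name_to_index_alt (obj : List Int) : List (Int × Int) :=
  let run := ntiPrefix (ntiChanges obj)
  ((obj.zip run).foldl (fun (d : PySem.Dict Int Int) p => d.insert p.1 p.2) PySem.Dict.empty).items

-- ===== PRECONDITION & SPEC =====
def Spec_name_to_index (obj : List Int) (out : List (Int × Int)) : Prop := out = name_to_index_alt obj
instance (obj : List Int) (out : List (Int × Int)) : Decidable (Spec_name_to_index obj out) := by unfold Spec_name_to_index; infer_instance

-- ===== CLAIM (what is proved, stated in full; the proofs are below) =====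
def Claim_equal_name_to_index : Prop := ∀ (obj : List Int), Dom_name_to_index obj → Spec_name_to_index obj (name_to_index obj)

-- ===== LEMMAS AND PROOFS =====

-- recursive form of the change-indicator list
def ntiDeltas (p : Int) : List Int → List Int
  | [] => []
  | x :: xs => (if x ≠ p then 1 else 0) :: ntiDeltas x xs

-- recursive form of the prefix sums, starting from a running total t
def ntiAccum (t : Int) : List Int → List Int
  | [] => []
  | x :: xs => (t + x) :: ntiAccum (t + x) xs

theorem nti_changes_eq_deltas (xs : List Int) : ∀ p : Int,
    ((p :: xs).zip xs).map (fun q : Int × Int => if q.2 ≠ q.1 then (1 : Int) else 0)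
      = ntiDeltas p xs := by
  induction xs with
  | nil => intro p; rfl
  | cons x xs ih =>
    intro p
    simp only [List.zip_cons_cons, List.map_cons, ntiDeltas]
    exact congrArg _ (ih x)

theorem nti_prefix_eq_accum (xs : List Int) :
    ∀ (acc : List Int) (t : Int),
      (xs.foldl (fun (s : List Int × Int) c => (s.1 ++ [s.2 + c], s.2 + c)) (acc, t)).1
        = acc ++ ntiAccum t xs := by
  induction xs with
  | nil => intro acc t; simp [ntiAccum]
  | cons x xs ih =>
    intro acc t
    simp only [List.foldl_cons, ntiAccum]
    rw [ih]
    simp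

-- A's fold, started from any state, produces the dict obtained by inserting the
-- (item, run index) pairs in order
theorem nti_fold_eq_insert (xs : List Int) :
    ∀ (p i : Int) (d : PySem.Dict Int Int),
      (xs.foldl ntiStepA (p, i, d)).2.2
        = ((xs.zip (ntiAccum i (ntiDeltas p xs))).foldl
            (fun (d : PySem.Dict Int Int) q => d.insert q.1 q.2) d) := by
  induction xs with
  | nil => intro p i d; rfl
  | cons x xs ih =>
    intro p i d
    have hidx : (if p ≠ x then i + 1 else i) = i + (if x ≠ p then 1 else 0) := by
      by_cases h : x = p <;> simp [h, ne_comm]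
    simp only [List.foldl_cons, ntiStepA, ntiDeltas, ntiAccum, List.zip_cons_cons]
    rw [hidx, ih]

-- ===== VERDICT (by name: the statement is the Claim_ definition above) =====
theorem name_to_index_spec : Claim_equal_name_to_index := by
  intro obj _
  unfold Spec_name_to_index name_to_index name_to_index_alt
  rw [nti_fold_eq_insert, ntiChanges, nti_changes_eq_deltas obj (-1),
      ntiPrefix, nti_prefix_eq_accum, List.nil_append]
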